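-- pv_equiv track=rewrite | github.com/kingsmo/Python_Study | algorithm/level3/최고의 집합.py | solution
-- ===== SOURCE A (Python) =====
-- def solution(n, s):
--
--     if n > s:
--         return [-1]
--
--     answer = []
--
--     #몫을 일단 초기값으로 놔둔다
--     for i in range(n):
--         answer.append(s//n)
--     # 나머지만큼 남은값에 더해줘야 한다.
--     addingNumber = s%n
--     while addingNumber>0:
--         for i in range(n):
--             if addingNumber>0:
--                 answer[i]+=1
--                 addingNumber -= 1
--             else:
--                 break
--     return sorted(answer)
-- ===== SOURCE B (Python) =====
-- def solution(n, s):
--     if n > s: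
--         return [-1]
--     q, r = divmod(s, n)
--     return [q] * (n - r) + [q + 1] * r
-- ===== Notes on version B (the rewrite author's own statement) =====
-- stated objective: faster
-- what changed: Replaces the append loop, the distribute-the-remainder while loop and the final sort by one divmod and a direct construction of the already-sorted answer [q]*(n-r)+[q+1]*r.
import Mathlib
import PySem

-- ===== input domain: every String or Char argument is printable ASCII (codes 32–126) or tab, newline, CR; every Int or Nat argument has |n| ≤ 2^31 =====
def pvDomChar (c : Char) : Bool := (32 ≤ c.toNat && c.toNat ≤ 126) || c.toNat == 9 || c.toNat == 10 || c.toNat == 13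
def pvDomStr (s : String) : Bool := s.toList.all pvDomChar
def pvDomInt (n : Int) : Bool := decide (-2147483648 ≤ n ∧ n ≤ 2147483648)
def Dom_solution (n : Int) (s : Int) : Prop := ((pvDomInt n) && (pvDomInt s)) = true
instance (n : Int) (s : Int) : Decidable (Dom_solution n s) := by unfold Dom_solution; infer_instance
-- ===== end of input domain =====

-- B replaces A's append loop, remainder-distribution while loop and final sort by one divmod
-- and the direct construction of the already-sorted list [q]*(n-r) + [q+1]*r.

-- ===== PORT A =====
-- one step of the inner 'for i in range(n)': if addingNumber>0: answer[i]+=1; addingNumber-=1; else: break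
-- (after the break condition addingNumber>0 turns false the remaining steps leave the state unchanged, which is what 'break' does)
def pvStep (st : List Int × Int) (i : Int) : List Int × Int :=
  if st.2 > 0 then (st.1.modify i.toNat (· + 1), st.2 - 1) else st

-- the inner 'for i in range(n)' pass
def pvInner (n : Int) (st : List Int × Int) : List Int × Int :=
  (PySem.List.pyRange 0 n 1).foldl pvStep st

-- 'while addingNumber > 0'; fuel bounds the number of rounds (addingNumber+1 rounds suffice whenever the Python loop terminates)
def pvWhile (n : Int) : Nat → List Int × Int → List Int
  | 0, st => st.1
  | fuel + 1, st => if st.2 > 0 then pvWhile n fuel (pvInner n st) else st.1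

def solution (n : Int) (s : Int) : List Int :=
  if n > s then [-1]
  else
    PySem.List.sorted
      (pvWhile n ((PySem.Int.mod s n).toNat + 1)
        ((PySem.List.pyRange 0 n 1).foldl (fun acc _ => acc ++ [PySem.Int.floordiv s n]) [],
         PySem.Int.mod s n))
      (fun x => x) false

-- ===== PORT B =====
def solution_alt (n : Int) (s : Int) : List Int :=
  if n > s then [-1]
  else
    PySem.List.pyRepeat [PySem.Int.floordiv s n] (n - PySem.Int.mod s n) ++
      PySem.List.pyRepeat [PySem.Int.floordiv s n + 1] (PySem.Int.mod s n)

-- ===== PRECONDITION & SPEC =====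
-- Pre_ excludes exactly n = 0 with n ≤ s: there Python A reaches 's % 0' and raises ZeroDivisionError (B's divmod raises too).
def Pre_solution (n : Int) (s : Int) : Prop := ¬ (n = 0 ∧ n ≤ s)
instance (n : Int) (s : Int) : Decidable (Pre_solution n s) := by unfold Pre_solution; infer_instance
def pvWitness_solution : Int × Int := (3, 11)

def Spec_solution (n : Int) (s : Int) (out : List Int) : Prop := out = solution_alt n s
instance (n : Int) (s : Int) (out : List Int) : Decidable (Spec_solution n s out) := by unfold Spec_solution; infer_instance

-- ===== CLAIM (what is proved, stated in full; the proofs are below) =====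
def Claim_equal_solution : Prop := ∀ (n : Int) (s : Int), Dom_solution n s → Pre_solution n s → Spec_solution n s (solution n s)

-- ===== LEMMAS AND PROOFS =====

-- once addingNumber is 0 the rest of the inner pass changes nothing (the Python 'break')
theorem pvStep_done (l : List Int) (ans : List Int) :
    l.foldl pvStep (ans, 0) = (ans, 0) := by
  induction l generalizing ans with
  | nil => rfl
  | cons x t ih => simpa [pvStep] using ih ans

theorem modify_at_length (pre : List Int) (x : Int) (t : List Int) (f : Int → Int) :
    (pre ++ x :: t).modify pre.length f = pre ++ f x :: t := by
  induction pre with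
  | nil => simp
  | cons a p ih => simpa using ih

-- the inner pass increments the k entries at positions pre.length, …, pre.length+k-1 and zeroes the counter
theorem pvInner_pass (n : Int) : ∀ (k : Nat) (j : Int) (pre suf : List Int),
    0 ≤ j → j.toNat = pre.length → suf.length = (n - j).toNat → (k : Int) ≤ n - j →
    (PySem.List.pyRange j n 1).foldl pvStep (pre ++ suf, (k : Int)) =
      (pre ++ ((suf.take k).map (· + 1) ++ suf.drop k), 0) := by
  intro k
  induction k with
  | zero => intro j pre suf _ _ _ _; simpa using pvStep_done _ _
  | succ k ih =>
    intro j pre suf hj hlen hsuf hk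
    have hjn : j < n := by omega
    rw [PySem.List.pyRange_one_cons hjn]
    cases suf with
    | nil => simp at hsuf; omega
    | cons x t =>
      have hstep : pvStep (pre ++ x :: t, ((k + 1 : Nat) : Int)) j = ((pre ++ [x + 1]) ++ t, (k : Int)) := by
        simp only [pvStep]
        rw [if_pos (by push_cast; omega)]
        rw [show j.toNat = pre.length from hlen, modify_at_length]
        rw [Prod.mk.injEq]
        exact ⟨by simp, by push_cast; ring⟩
      rw [List.foldl_cons, hstep]
      have := ih (j + 1) (pre ++ [x + 1]) t (by omega)
        (by simp [← hlen]; omega) (by simp at hsuf ⊢; omega) (by omega)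
      rw [this]
      simp

-- the whole main branch for n > 0: answer = [q]*n, then one pass distributes r, then adding = 0 stops the loop
theorem pvWhile_main (n : Int) (q r : Int) (_hn : 0 < n) (hr : 0 ≤ r) (hrn : r < n) :
    pvWhile n (r.toNat + 1) (List.replicate n.toNat q, r) =
      List.replicate r.toNat (q + 1) ++ List.replicate (n.toNat - r.toNat) q := by
  have hpass := pvInner_pass n r.toNat 0 [] (List.replicate n.toNat q)
    (le_refl 0) (by simp) (by simp) (by omega)
  rw [Int.toNat_of_nonneg hr] at hpass
  simp only [List.nil_append] at hpass
  rcases Nat.eq_zero_or_pos r.toNat with h0 | hpos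
  · have : r = 0 := by omega
    subst this
    simp [pvWhile, h0]
  · show pvWhile n (r.toNat + 1) _ = _
    rw [pvWhile, if_pos (by simp; omega)]
    rw [show pvInner n (List.replicate n.toNat q, r) = _ from hpass]
    obtain ⟨f, hf⟩ : ∃ f, r.toNat = f + 1 := ⟨r.toNat - 1, by omega⟩
    rw [hf, pvWhile, if_neg (by simp)]
    simp [List.take_replicate, List.drop_replicate]
    omega

theorem pairwise_le_two_blocks (a b : Nat) (q : Int) :
    (List.replicate a q ++ List.replicate b (q + 1)).Pairwise (· ≤ ·) := by
  rw [List.pairwise_append]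
  refine ⟨List.pairwise_replicate.mpr (Or.inr (by omega)), List.pairwise_replicate.mpr (Or.inr (by omega)), ?_⟩
  intro x hx y hy
  rw [List.eq_of_mem_replicate hx, List.eq_of_mem_replicate hy]
  omega

-- ===== VERDICT (by name: the statement is the Claim_ definition above) =====
theorem solution_spec : Claim_equal_solution := by
  intro n s _ hpre
  unfold Spec_solution solution solution_alt
  by_cases hns : n > s
  · simp [hns]
  · rw [if_neg hns, if_neg hns]
    set q := PySem.Int.floordiv s n with hq
    set r := PySem.Int.mod s n with hr
    have hn0 : n ≠ 0 := fun h => hpre ⟨h, by omega⟩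
    rcases lt_or_gt_of_ne hn0 with hneg | hpos
    · -- n < 0 : the loop never runs, both sides are []
      have hb := PySem.Int.mod_neg_bounds s (b := n) hneg
      rw [PySem.List.pyRange_one_eq_nil (by omega)]
      simp only [List.foldl_nil]
      rw [pvWhile, if_neg (by simp; omega)]
      rw [PySem.List.pyRepeat_singleton, PySem.List.pyRepeat_singleton]
      rw [show (n - r).toNat = 0 by omega, show r.toNat = 0 by omega]
      simp [PySem.List.sorted]
    · -- n > 0
      have hr0 : 0 ≤ r := PySem.Int.mod_nonneg s hpos
      have hrn : r < n := PySem.Int.mod_lt s hpos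
      have hinit : (PySem.List.pyRange 0 n 1).foldl (fun acc _ => acc ++ [q]) [] =
          List.replicate n.toNat q := by
        rw [PySem.List.foldl_append_singleton_eq_map]
        simp [List.map_const', PySem.List.length_pyRange_one]
      rw [hinit, pvWhile_main n q r hpos hr0 hrn]
      rw [PySem.List.pyRepeat_singleton, PySem.List.pyRepeat_singleton]
      have hnr : (n - r).toNat = n.toNat - r.toNat := by omega
      rw [hnr]
      exact PySem.List.sorted_id_eq_of_perm_of_pairwise _ _
        List.perm_append_comm (pairwise_le_two_blocks _ _ q)
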